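-- pv_equiv track=rewrite | github.com/wonju-dev/codingTestStudy | 3차/1차시도/3.py | solution
-- ===== SOURCE A (Python) =====
-- def isWorking(now, work, rest, distance):
--     period = work + rest
--     for i in range((distance // period) + 1):
--         workingRange = range(period * i + 1, period * i + work + 1)
--         if now in workingRange:
--             return True
--     return False
--
-- def solution(distance, scopes, times):
--     d = 0
--     # 매 위치(초)에 대해
--     for d in range(1, distance + 1):
--         for s in range(len(scopes)):
--             # s 초 일때 구간에 속함?
--             if d in range(scopes[s][0], scopes[s][1] + 1):
--                 # s 초 일때 일하는 중?
--                 if isWorking(d, times[s][0], times[s][1], distance):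
--                     return d
--
--     return d
-- ===== SOURCE B (Python) =====
-- def solution(distance, scopes, times):
--     best = None
--     for sc, tm in zip(scopes, times):
--         work = tm[0]
--         period = work + tm[1]
--         if period <= 0:
--             # non-positive cycle: this camera is never working
--             continue
--         for d in range(max(1, sc[0]), min(distance, sc[1]) + 1):
--             if (d - 1) % period < work:
--                 if best is None or d < best:
--                     best = d
--                 break
--     return best if best is not None else max(distance, 0)
-- ===== Notes on version B (the rewrite author's own statement) =====
-- stated objective: faster
-- what changed: A scans positions 1..distance outermost and early-returns at the first position where some camera's scope contains it and an inner window-enumeration loop (isWorking) says it is on; B instead iterates cameras outermost, computes each camera's first active position inside its clamped window with a single modular test (d-1) % period < work, and returns the minimum over cameras, defaulting to max(distance, 0) which reproduces A's dangling loop-variable return.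
-- outside the precondition, e.g. on solution(0, [[]], [[]]): A returns 0, B raises IndexError
import Mathlib
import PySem

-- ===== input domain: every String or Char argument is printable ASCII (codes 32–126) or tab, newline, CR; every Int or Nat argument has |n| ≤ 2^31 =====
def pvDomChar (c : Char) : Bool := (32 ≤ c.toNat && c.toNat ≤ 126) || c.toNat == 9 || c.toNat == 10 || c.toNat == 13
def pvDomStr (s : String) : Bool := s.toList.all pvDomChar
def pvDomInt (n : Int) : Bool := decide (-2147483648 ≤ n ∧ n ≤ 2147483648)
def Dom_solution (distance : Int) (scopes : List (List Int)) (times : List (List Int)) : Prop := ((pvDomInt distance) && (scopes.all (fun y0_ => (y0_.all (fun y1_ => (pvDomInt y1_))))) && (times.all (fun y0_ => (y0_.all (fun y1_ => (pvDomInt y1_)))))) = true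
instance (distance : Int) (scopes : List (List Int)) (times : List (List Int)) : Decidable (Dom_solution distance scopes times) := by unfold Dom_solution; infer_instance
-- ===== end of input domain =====

-- B replaces A's position-outer early-return scan by a camera-outer pass that takes the minimum
-- of each camera's first active position, testing activity by one modular check instead of A's
-- window enumeration (objective: faster — measured).

-- ===== PORT A =====
-- 'now in range(a, b)' is the arithmetic test a ≤ now < b; 'period' (= work + rest) is inlined.
def isWorkingA (now work rest distance : Int) : Bool :=
  (PySem.List.pyRange 0 (PySem.Int.floordiv distance (work + rest) + 1) 1).any
    (fun i => decide ((work + rest) * i + 1 ≤ now ∧ now < (work + rest) * i + work + 1))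

-- the early-returning double loop is 'find?' over the positions d of the first d some camera
-- s accepts; the dangling loop variable d of A's 'return d' is the last element of the range
-- (0 when the range is empty, matching d = 0 before the loop).
def solution (distance : Int) (scopes : List (List Int)) (times : List (List Int)) : Int :=
  match (PySem.List.pyRange 1 (distance + 1) 1).find? (fun d =>
    (PySem.List.pyRange 0 (scopes.length : Int) 1).any (fun s =>
      decide (PySem.List.pyGetD (PySem.List.pyGetD scopes s []) 0 0 ≤ d ∧
              d < PySem.List.pyGetD (PySem.List.pyGetD scopes s []) 1 0 + 1) &&
      isWorkingA d (PySem.List.pyGetD (PySem.List.pyGetD times s []) 0 0)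
                   (PySem.List.pyGetD (PySem.List.pyGetD times s []) 1 0) distance)) with
  | some d => d
  | none => ((PySem.List.pyRange 1 (distance + 1) 1).getLast?).getD 0

-- ===== PORT B =====
-- Source B's camera loop is a foldl over zip(scopes, times) carrying the running minimum 'best';
-- the inner loop-with-break is 'find?' over the camera's clamped window ('work' and 'period'
-- are inlined: work = p.2[0], period = p.2[0] + p.2[1]).
def solution_alt (distance : Int) (scopes : List (List Int)) (times : List (List Int)) : Int :=
  match (scopes.zip times).foldl (fun best p =>
    if PySem.List.pyGetD p.2 0 0 + PySem.List.pyGetD p.2 1 0 ≤ 0 then best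
    else
      match (PySem.List.pyRange (max 1 (PySem.List.pyGetD p.1 0 0))
              (min distance (PySem.List.pyGetD p.1 1 0) + 1) 1).find?
              (fun d => decide (PySem.Int.mod (d - 1)
                 (PySem.List.pyGetD p.2 0 0 + PySem.List.pyGetD p.2 1 0) < PySem.List.pyGetD p.2 0 0)) with
      | none => best
      | some c => match best with
        | none => some c
        | some b => if c < b then some c else best) none with
  | some b => b
  | none => max distance 0

-- ===== PRECONDITION & SPEC =====
-- Pre_ excludes inputs where a scopes/times row paired with a camera is shorter than 2 or times
-- has fewer rows than scopes (IndexError when A's loops reach the row; B reads every paired row),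
-- and inputs where a camera whose scope window meets [1, distance] has work+rest = 0
-- (ZeroDivisionError in isWorking); for uniformity the same shape conditions are also required
-- for rows A happens never to reach (e.g. when distance < 1), where A returns its default.
def Pre_solution (distance : Int) (scopes : List (List Int)) (times : List (List Int)) : Prop :=
  scopes.length ≤ times.length ∧
  ∀ p ∈ scopes.zip times, 2 ≤ p.1.length ∧ 2 ≤ p.2.length ∧
    (max 1 (PySem.List.pyGetD p.1 0 0) ≤ min distance (PySem.List.pyGetD p.1 1 0) →
      PySem.List.pyGetD p.2 0 0 + PySem.List.pyGetD p.2 1 0 ≠ 0)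
instance (distance : Int) (scopes : List (List Int)) (times : List (List Int)) : Decidable (Pre_solution distance scopes times) := by unfold Pre_solution; infer_instance

def pvWitness_solution : Int × List (List Int) × List (List Int) :=
  (6, [[2, 4], [3, 6]], [[1, 2], [2, 1]])

def Spec_solution (distance : Int) (scopes : List (List Int)) (times : List (List Int)) (out : Int) : Prop := out = solution_alt distance scopes times
instance (distance : Int) (scopes : List (List Int)) (times : List (List Int)) (out : Int) : Decidable (Spec_solution distance scopes times out) := by unfold Spec_solution; infer_instance

-- ===== CLAIM (what is proved, stated in full; the proofs are below) =====
def Claim_equal_solution : Prop := ∀ (distance : Int) (scopes : List (List Int)) (times : List (List Int)), Dom_solution distance scopes times → Pre_solution distance scopes times → Spec_solution distance scopes times (solution distance scopes times)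

-- ===== LEMMAS AND PROOFS =====

-- Option-valued minimum (none = "no candidate"); the fold step of solution_alt computes it.
def optMin (a b : Option Int) : Option Int :=
  match a, b with
  | none, b => b
  | a, none => a
  | some x, some y => some (min x y)

theorem optMin_none_right (a : Option Int) : optMin a none = a := by cases a <;> rfl

theorem optMin_assoc (a b c : Option Int) : optMin (optMin a b) c = optMin a (optMin b c) := by
  cases a <;> cases b <;> cases c <;> simp [optMin, min_assoc]

theorem step_eq_optMin (best cand : Option Int) :
    (match cand with
     | none => best
     | some c => match best with
       | none => some c
       | some b => if c < b then some c else best) = optMin best cand := by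
  cases cand with
  | none => cases best <;> rfl
  | some c =>
    cases best with
    | none => rfl
    | some b =>
      by_cases h : c < b <;> by_cases h2 : b ≤ c <;>
        simp [optMin, min_def, h, h2] <;> omega

theorem find?_congr_mem {α : Type} (l : List α) (p q : α → Bool)
    (h : ∀ x ∈ l, p x = q x) : l.find? p = l.find? q := by
  induction l with
  | nil => rfl
  | cons a l ih =>
    simp only [List.find?_cons]
    rw [h a (by simp)]
    cases q a
    · exact ih (fun x hx => h x (by simp [hx]))
    · rfl

-- a find? over a subrange, as a find? over the enclosing range with the bounds in the predicate
theorem find?_pyRange_restrict (a b a' b' : Int) (p : Int → Bool)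
    (h1 : a ≤ a') (h2 : b' ≤ b) :
    (PySem.List.pyRange a b 1).find? (fun d => decide (a' ≤ d ∧ d < b') && p d) =
    (PySem.List.pyRange a' b' 1).find? p := by
  by_cases hlt : a' < b'
  · rw [PySem.List.pyRange_one_append a a' b h1 (by omega),
        PySem.List.pyRange_one_append a' b' b (by omega) h2,
        List.find?_append, List.find?_append]
    have e1 : (PySem.List.pyRange a a' 1).find? (fun d => decide (a' ≤ d ∧ d < b') && p d) = none := by
      rw [List.find?_eq_none]
      intro x hx
      rw [PySem.List.mem_pyRange_one] at hx
      simp; omega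
    have e3 : (PySem.List.pyRange b' b 1).find? (fun d => decide (a' ≤ d ∧ d < b') && p d) = none := by
      rw [List.find?_eq_none]
      intro x hx
      rw [PySem.List.mem_pyRange_one] at hx
      simp; omega
    have e2 : (PySem.List.pyRange a' b' 1).find? (fun d => decide (a' ≤ d ∧ d < b') && p d) =
        (PySem.List.pyRange a' b' 1).find? p := by
      apply find?_congr_mem
      intro x hx
      rw [PySem.List.mem_pyRange_one] at hx
      simp [hx.1, hx.2]
    rw [e1, e2, e3, Option.none_or, Option.or_none]
  · rw [PySem.List.pyRange_one_eq_nil (by omega : b' ≤ a')]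
    simp only [List.find?_nil]
    rw [List.find?_eq_none]
    intro x hx
    rw [PySem.List.mem_pyRange_one] at hx
    simp; omega

-- first hit of a disjunction on a strictly increasing list = minimum of the two first hits
theorem find?_or_eq_optMin (R : List Int) (hR : R.Pairwise (· < ·)) (p q : Int → Bool) :
    R.find? (fun d => p d || q d) = optMin (R.find? p) (R.find? q) := by
  induction R with
  | nil => rfl
  | cons x R ih =>
    have hx : ∀ y ∈ R, x < y := (List.pairwise_cons.mp hR).1
    have hR' : R.Pairwise (· < ·) := (List.pairwise_cons.mp hR).2
    simp only [List.find?_cons]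
    cases hp : p x with
    | true =>
      simp only [Bool.true_or]
      cases hq : q x with
      | true => simp [optMin]
      | false =>
        cases hfq : R.find? q with
        | none => simp [optMin]
        | some y =>
          have hy : x < y := hx y (List.mem_of_find?_eq_some hfq)
          simp [optMin, le_of_lt hy]
    | false =>
      cases hq : q x with
      | true =>
        simp only [Bool.false_or]
        cases hfp : R.find? p with
        | none => simp [optMin]
        | some y =>
          have hy : x < y := hx y (List.mem_of_find?_eq_some hfp)
          have hyx : ¬ (y ≤ x) := by omega
          simp [optMin, min_def, hyx]
      | false =>
        simp only [Bool.false_or]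
        exact ih hR'

-- a camera with a negative period is never working (the loop of isWorking runs zero times)
theorem isWorkingA_neg (now work rest distance : Int) (h1 : 1 ≤ now) (h2 : now ≤ distance)
    (hp : work + rest < 0) :
    isWorkingA now work rest distance = false := by
  unfold isWorkingA
  have hm := PySem.Int.mod_neg_bounds distance hp
  have heq := PySem.Int.floordiv_mul_add_mod distance (work + rest)
  have hf : PySem.Int.floordiv distance (work + rest) < 0 := by
    by_contra h
    push_neg at h
    have : PySem.Int.floordiv distance (work + rest) * (work + rest) ≤ 0 :=
      mul_nonpos_of_nonneg_of_nonpos h (le_of_lt hp)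
    omega
  rw [PySem.List.pyRange_one_eq_nil (by omega)]
  rfl

-- characterisation of A's isWorking with a positive period: one modular test
theorem isWorkingA_pos (now work rest distance : Int) (h1 : 1 ≤ now) (h2 : now ≤ distance)
    (hp : 0 < work + rest) :
    isWorkingA now work rest distance = decide (PySem.Int.mod (now - 1) (work + rest) < work) := by
  unfold isWorkingA
  set P := work + rest with hP
  rw [Bool.eq_iff_iff]
  simp only [List.any_eq_true, PySem.List.mem_pyRange_one, decide_eq_true_eq]
  rw [PySem.Int.mod_eq_emod_of_pos hp, PySem.Int.floordiv_eq_ediv_of_pos hp]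
  set f := (now - 1) / P with hfdef
  set m := (now - 1) % P with hmdef
  have hm0 : 0 ≤ m := Int.emod_nonneg _ (by omega)
  have hm1 : m < P := Int.emod_lt_of_pos _ hp
  have heq : P * f + m = now - 1 := Int.ediv_add_emod (now - 1) P
  constructor
  · rintro ⟨i, ⟨hi0, hi1⟩, hw1, hw2⟩
    by_cases hw : P ≤ work
    · omega
    · push_neg at hw
      have hif : i ≤ f := by
        have h1' : P * i < P * (f + 1) := by linarith [show P * (f + 1) = P * f + P from by ring]
        have := lt_of_mul_lt_mul_left h1' (le_of_lt hp)
        omega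
      have hfi : f ≤ i := by
        have h1' : P * f < P * (i + 1) := by linarith [show P * (i + 1) = P * i + P from by ring]
        have := lt_of_mul_lt_mul_left h1' (le_of_lt hp)
        omega
      have : i = f := le_antisymm hif hfi
      subst this
      omega
  · intro hm
    refine ⟨f, ⟨?_, ?_⟩, ?_, ?_⟩
    · by_contra h
      push_neg at h
      have : P * f ≤ P * (-1) :=
        mul_le_mul_of_nonneg_left (by omega) (le_of_lt hp)
      omega
    · have : f ≤ distance / P := Int.ediv_le_ediv hp (by omega)
      omega
    · omega
    · omega

-- at each position 1 ≤ d ≤ distance, A's per-camera test equals B's window+modular test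
theorem point_eq (distance d lo hi work rest : Int) (hd1 : 1 ≤ d) (hd2 : d ≤ distance)
    (hP : max 1 lo ≤ min distance hi → work + rest ≠ 0) :
    (decide (lo ≤ d ∧ d < hi + 1) && isWorkingA d work rest distance) =
    (decide (max 1 lo ≤ d ∧ d < min distance hi + 1) &&
      (decide (0 < work + rest) && decide (PySem.Int.mod (d - 1) (work + rest) < work))) := by
  by_cases hs : lo ≤ d ∧ d < hi + 1
  · have hw : max 1 lo ≤ min distance hi := by omega
    rcases lt_trichotomy (work + rest) 0 with h | h | h
    · rw [isWorkingA_neg d work rest distance hd1 hd2 h]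
      simp [show ¬ (0 < work + rest) by omega]
    · exact absurd h (hP hw)
    · rw [isWorkingA_pos d work rest distance hd1 hd2 h]
      simp [hs.1, hs.2, h, show max 1 lo ≤ d by omega, show d < min distance hi + 1 by omega]
  · by_cases hlo : lo ≤ d
    · have hhi : ¬ d ≤ hi := by omega
      simp [hhi]
    · simp [hlo]

-- A's index-driven 'any' over range(len(scopes)) is an 'any' over zip(scopes, times)
theorem any_index_eq_zip (scopes times : List (List Int)) (h : scopes.length ≤ times.length)
    (f : List Int → List Int → Bool) :
    (PySem.List.pyRange 0 (scopes.length : Int) 1).any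
      (fun s => f (PySem.List.pyGetD scopes s []) (PySem.List.pyGetD times s [])) =
    (scopes.zip times).any (fun p => f p.1 p.2) := by
  rw [Bool.eq_iff_iff]
  simp only [List.any_eq_true, PySem.List.mem_pyRange_one]
  constructor
  · rintro ⟨s, ⟨hs0, hs1⟩, hf⟩
    have hsn : s.toNat < scopes.length := by omega
    have hsn' : s.toNat < times.length := by omega
    refine ⟨(scopes.zip times)[s.toNat]'(by rw [List.length_zip]; omega), List.getElem_mem _, ?_⟩
    rw [List.getElem_zip]
    rwa [PySem.List.pyGetD_eq_getElem scopes [] hs0 (by exact_mod_cast hs1),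
         PySem.List.pyGetD_eq_getElem times [] hs0 (by exact_mod_cast (by omega : s < (times.length : Int)))] at hf
  · rintro ⟨p, hp, hf⟩
    obtain ⟨k, hk, hpk⟩ := List.mem_iff_getElem.mp hp
    rw [List.length_zip] at hk
    refine ⟨(k : Int), ⟨by omega, by exact_mod_cast (by omega : k < scopes.length)⟩, ?_⟩
    rw [PySem.List.pyGetD_eq_getElem scopes [] (by omega) (by exact_mod_cast (by omega : k < scopes.length)),
        PySem.List.pyGetD_eq_getElem times [] (by omega) (by exact_mod_cast (by omega : k < times.length))]
    rw [← hpk] at hf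
    rw [List.getElem_zip] at hf
    simpa using hf

theorem foldl_optMin_acc (F : List Int × List Int → Option Int)
    (ps : List (List Int × List Int)) (acc : Option Int) :
    ps.foldl (fun a p => optMin a (F p)) acc =
    optMin acc (ps.foldl (fun a p => optMin a (F p)) none) := by
  induction ps generalizing acc with
  | nil => exact (optMin_none_right acc).symm
  | cons p ps ih =>
    simp only [List.foldl_cons]
    rw [ih (optMin acc (F p)), ih (optMin none (F p))]
    rw [show optMin none (F p) = F p from rfl, optMin_assoc]

-- first position at which SOME camera fires = fold of the cameras' individual first positions
theorem find?_any_eq_foldl (R : List Int) (hR : R.Pairwise (· < ·))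
    (Q : List Int × List Int → Int → Bool) (ps : List (List Int × List Int)) :
    R.find? (fun d => ps.any (fun p => Q p d)) =
    ps.foldl (fun acc p => optMin acc (R.find? (Q p))) none := by
  induction ps with
  | nil => simp
  | cons p ps ih =>
    have e1 : (fun d => (p :: ps).any (fun p => Q p d)) =
        (fun d => Q p d || ps.any (fun p => Q p d)) := by
      funext d; simp
    rw [e1, find?_or_eq_optMin R hR, ih]
    simp only [List.foldl_cons]
    conv_rhs => rw [foldl_optMin_acc]
    rfl

-- B's per-camera candidate (window find?) as a find? over the full position range
def camCand (distance : Int) (p : List Int × List Int) : Option Int :=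
  if PySem.List.pyGetD p.2 0 0 + PySem.List.pyGetD p.2 1 0 ≤ 0 then none
  else (PySem.List.pyRange (max 1 (PySem.List.pyGetD p.1 0 0))
         (min distance (PySem.List.pyGetD p.1 1 0) + 1) 1).find?
         (fun d => decide (PySem.Int.mod (d - 1)
            (PySem.List.pyGetD p.2 0 0 + PySem.List.pyGetD p.2 1 0) < PySem.List.pyGetD p.2 0 0))

theorem camCand_eq (distance : Int) (p : List Int × List Int) :
    camCand distance p =
    (PySem.List.pyRange 1 (distance + 1) 1).find? (fun d =>
      decide (max 1 (PySem.List.pyGetD p.1 0 0) ≤ d ∧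
              d < min distance (PySem.List.pyGetD p.1 1 0) + 1) &&
      (decide (0 < PySem.List.pyGetD p.2 0 0 + PySem.List.pyGetD p.2 1 0) &&
       decide (PySem.Int.mod (d - 1)
          (PySem.List.pyGetD p.2 0 0 + PySem.List.pyGetD p.2 1 0) < PySem.List.pyGetD p.2 0 0))) := by
  by_cases h : PySem.List.pyGetD p.2 0 0 + PySem.List.pyGetD p.2 1 0 ≤ 0
  · rw [camCand, if_pos h]
    symm
    rw [List.find?_eq_none]
    intro x _
    simp [show ¬ (0 < PySem.List.pyGetD p.2 0 0 + PySem.List.pyGetD p.2 1 0) by omega]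
  · rw [camCand, if_neg h]
    rw [← find?_pyRange_restrict 1 (distance + 1)
          (max 1 (PySem.List.pyGetD p.1 0 0)) (min distance (PySem.List.pyGetD p.1 1 0) + 1)
          _ (by omega) (by omega)]
    apply find?_congr_mem
    intro x _
    simp [show 0 < PySem.List.pyGetD p.2 0 0 + PySem.List.pyGetD p.2 1 0 by omega]

-- A's dangling-d default equals max distance 0
theorem default_eq (distance : Int) :
    ((PySem.List.pyRange 1 (distance + 1) 1).getLast?).getD 0 = max distance 0 := by
  by_cases h : 1 ≤ distance
  · rw [PySem.List.pyRange_one_succ_right h]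
    simp
    omega
  · rw [PySem.List.pyRange_one_eq_nil (by omega)]
    simp
    omega

-- ===== VERDICT (by name: the statement is the Claim_ definition above) =====
theorem solution_spec : Claim_equal_solution := by
  unfold Claim_equal_solution
  intro distance scopes times _hdom hpre
  unfold Spec_solution solution solution_alt
  obtain ⟨hlen, hrows⟩ := hpre
  -- B's fold step is optMin with the camera candidate
  have hstep :
      (fun (best : Option Int) (p : List Int × List Int) =>
        if PySem.List.pyGetD p.2 0 0 + PySem.List.pyGetD p.2 1 0 ≤ 0 then best
        else
          match (PySem.List.pyRange (max 1 (PySem.List.pyGetD p.1 0 0))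
                  (min distance (PySem.List.pyGetD p.1 1 0) + 1) 1).find?
                  (fun d => decide (PySem.Int.mod (d - 1)
                     (PySem.List.pyGetD p.2 0 0 + PySem.List.pyGetD p.2 1 0) < PySem.List.pyGetD p.2 0 0)) with
          | none => best
          | some c => match best with
            | none => some c
            | some b => if c < b then some c else best)
      = (fun best p => optMin best (camCand distance p)) := by
    funext best p
    by_cases h : PySem.List.pyGetD p.2 0 0 + PySem.List.pyGetD p.2 1 0 ≤ 0
    · rw [if_pos h, camCand, if_pos h, optMin_none_right]
    · rw [if_neg h, camCand, if_neg h, step_eq_optMin]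
  rw [hstep]
  -- A's find? predicate, rewritten camera-by-camera into B's
  have hfind :
      (PySem.List.pyRange 1 (distance + 1) 1).find? (fun d =>
        (PySem.List.pyRange 0 (scopes.length : Int) 1).any (fun s =>
          decide (PySem.List.pyGetD (PySem.List.pyGetD scopes s []) 0 0 ≤ d ∧
                  d < PySem.List.pyGetD (PySem.List.pyGetD scopes s []) 1 0 + 1) &&
          isWorkingA d (PySem.List.pyGetD (PySem.List.pyGetD times s []) 0 0)
                       (PySem.List.pyGetD (PySem.List.pyGetD times s []) 1 0) distance)) =
      (scopes.zip times).foldl (fun acc p => optMin acc (camCand distance p)) none := by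
    have h1 :
        (PySem.List.pyRange 1 (distance + 1) 1).find? (fun d =>
          (PySem.List.pyRange 0 (scopes.length : Int) 1).any (fun s =>
            decide (PySem.List.pyGetD (PySem.List.pyGetD scopes s []) 0 0 ≤ d ∧
                    d < PySem.List.pyGetD (PySem.List.pyGetD scopes s []) 1 0 + 1) &&
            isWorkingA d (PySem.List.pyGetD (PySem.List.pyGetD times s []) 0 0)
                         (PySem.List.pyGetD (PySem.List.pyGetD times s []) 1 0) distance)) =
        (PySem.List.pyRange 1 (distance + 1) 1).find? (fun d =>
          (scopes.zip times).any (fun p =>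
            decide (max 1 (PySem.List.pyGetD p.1 0 0) ≤ d ∧
                    d < min distance (PySem.List.pyGetD p.1 1 0) + 1) &&
            (decide (0 < PySem.List.pyGetD p.2 0 0 + PySem.List.pyGetD p.2 1 0) &&
             decide (PySem.Int.mod (d - 1)
                (PySem.List.pyGetD p.2 0 0 + PySem.List.pyGetD p.2 1 0) < PySem.List.pyGetD p.2 0 0)))) := by
      apply find?_congr_mem
      intro d hd
      rw [PySem.List.mem_pyRange_one] at hd
      rw [any_index_eq_zip scopes times hlen
            (fun sc tm =>
              decide (PySem.List.pyGetD sc 0 0 ≤ d ∧ d < PySem.List.pyGetD sc 1 0 + 1) &&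
              isWorkingA d (PySem.List.pyGetD tm 0 0) (PySem.List.pyGetD tm 1 0) distance)]
      apply PySem.List.any_congr_mem
      intro p hp
      exact point_eq distance d _ _ _ _ hd.1 (by omega) (hrows p hp).2.2
    rw [h1, find?_any_eq_foldl _ (PySem.List.pairwise_lt_pyRange_one 1 (distance + 1))]
    congr 1
    funext acc p
    rw [camCand_eq]
  rw [hfind]
  cases (scopes.zip times).foldl (fun acc p => optMin acc (camCand distance p)) none with
  | none => simp [default_eq]
  | some b => rfl
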